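-- pv_equiv track=rewrite | github.com/seas-cs32/chap14 | string_bug.py | string_bug
-- ===== SOURCE A (Python) =====
-- DQC = '"'
--
-- def string_bug(f):
--     '''An baby version of `found_bug`, which analyzes a
--     function f, passed as a string, for unpaired double-quote
--     characters in the definition of a string literal. It's
--     not smart enough to deal with double-quote characters in
--     a comment, or instances of themselves in a string literal.'''
--     # Create a worklist of the form: non-string, string, ...
--     work_list = f.split(DQC)
--     items = len(work_list)
--
--     # Handle the case of a function f that doesn't
--     # contain any string literals
--     if items == 1:
--         # No double-quote string literals in f
--         return "No"
--
--     # Process just the strings in the worklist. String literals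
--     # defined using a single double-quote character cannot
--     # contain a newline character.
--     for i in range(1, items, 2):
--         if '\n' in work_list[i]:
--             return "Yes"
--
--     # Make sure the last string ended with a double quote, which
--     # means the length of work_list should be odd.
--     if items & 1 != 1:
--         return "Yes"
--
--     return "No"
-- ===== SOURCE B (Python) =====
-- def string_bug(f):
--     '''Single-pass scanner: flip an `inside`-string flag on each double
--     quote; a newline while inside, or being inside at the end, means an
--     unpaired quote.'''
--     inside = False
--     for c in f:
--         if c == '"':
--             inside = not inside
--         elif inside and c == '\n':
--             return "Yes"
--     return "Yes" if inside else "No"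
-- ===== Notes on version B (the rewrite author's own statement) =====
-- stated objective: simpler
-- what changed: Replaced A's split-on-quote into a worklist plus a stride-2 index scan over the odd entries (and a final parity check of the list length) by a single character pass that maintains an inside-string flag, returning Yes on a newline while inside or when the flag is still set at the end.
import Mathlib
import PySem

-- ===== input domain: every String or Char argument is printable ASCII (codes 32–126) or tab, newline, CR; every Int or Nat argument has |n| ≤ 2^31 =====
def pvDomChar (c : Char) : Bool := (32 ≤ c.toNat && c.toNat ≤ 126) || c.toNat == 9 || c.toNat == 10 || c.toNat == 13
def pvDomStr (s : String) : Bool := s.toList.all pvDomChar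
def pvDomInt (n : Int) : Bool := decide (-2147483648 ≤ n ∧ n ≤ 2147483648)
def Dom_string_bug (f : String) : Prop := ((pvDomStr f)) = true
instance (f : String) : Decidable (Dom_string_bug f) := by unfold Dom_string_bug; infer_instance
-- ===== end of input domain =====

-- B replaces A's split-on-quote list plus stride-2 index scan by a single pass over the
-- characters with an inside-string flag (objective: simpler, one pass, no intermediate list).

-- ===== PORT A =====
-- the 'for i in range(1, items, 2): if '\n' in work_list[i]: return "Yes"' loop
def stringBugLoop (wl : List (List Char)) : List Int → Option String
  | [] => none
  | i :: rest =>
    if PySem.Chars.isIn ['\n'] (PySem.List.pyGetD wl i []) then some "Yes"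
    else stringBugLoop wl rest

def string_bug (f : String) : String :=
  let workList := PySem.Chars.splitOn f.toList ['"']
  let items : Int := (workList.length : Int)
  if items = 1 then "No"
  else
    match stringBugLoop workList (PySem.List.pyRange 1 items 2) with
    | some r => r
    | none => if PySem.Int.band items 1 ≠ 1 then "Yes" else "No"

-- ===== PORT B =====
-- single pass with the `inside` flag; early return "Yes" on a newline while inside
def scanAlt : List Char → Bool → String
  | [], inside => if inside then "Yes" else "No"
  | c :: rest, inside =>
    if c = '"' then scanAlt rest (!inside)
    else if inside && c = '\n' then "Yes"
    else scanAlt rest inside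

def string_bug_alt (f : String) : String := scanAlt f.toList false

-- ===== PRECONDITION & SPEC =====
def Spec_string_bug (f : String) (out : String) : Prop := out = string_bug_alt f
instance (f : String) (out : String) : Decidable (Spec_string_bug f out) := by unfold Spec_string_bug; infer_instance

-- ===== CLAIM (what is proved, stated in full; the proofs are below) =====
def Claim_equal_string_bug : Prop := ∀ (f : String), Dom_string_bug f → Spec_string_bug f (string_bug f)

-- ===== LEMMAS AND PROOFS =====

-- structural characterisation of splitting on the single character '"'
def mySplit : List Char → List (List Char)
  | [] => [[]]
  | c :: rest =>
    if c = '"' then [] :: mySplit rest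
    else match mySplit rest with
      | [] => [[c]]
      | s :: ss => (c :: s) :: ss

lemma mySplit_ne_nil (cs : List Char) : mySplit cs ≠ [] := by
  cases cs with
  | nil => simp [mySplit]
  | cons c rest =>
    simp only [mySplit]
    split_ifs
    · simp
    · cases h : mySplit rest <;> simp

-- prepend a prefix onto the first segment
def consHead (p : List Char) : List (List Char) → List (List Char)
  | [] => [p]
  | s :: ss => (p ++ s) :: ss

lemma go_spec (fuel : Nat) (cs cur : List Char) (acc : List (List Char))
    (h : cs.length ≤ fuel) :
    PySem.Chars.splitOn.go ['"'] fuel cs cur acc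
      = acc.reverse ++ consHead cur.reverse (mySplit cs) := by
  induction fuel generalizing cs cur acc with
  | zero =>
    have : cs = [] := by cases cs <;> simp_all
    subst this
    simp [PySem.Chars.splitOn.go, mySplit, consHead]
  | succ n ih =>
    cases cs with
    | nil => simp [PySem.Chars.splitOn.go, mySplit, consHead]
    | cons c rest =>
      simp only [PySem.Chars.splitOn.go]
      by_cases hc : c = '"'
      · subst hc
        have hpre : List.isPrefixOf ['"'] ('"' :: rest) = true := by
          simp [List.isPrefixOf]
        rw [if_pos hpre]
        have hlen : rest.length ≤ n := by simpa using h
        simp only [List.length_singleton, List.drop_succ_cons, List.drop_zero]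
        rw [ih rest [] (cur.reverse :: acc) hlen]
        simp only [mySplit, reduceIte]
        
        cases hm : mySplit rest with
        | nil => exact absurd hm (mySplit_ne_nil rest)
        | cons s ss => simp [consHead]
      · have hpre : List.isPrefixOf ['"'] (c :: rest) = false := by
          simp [List.isPrefixOf]
          exact fun hh => hc hh.symm
        rw [if_neg (by simp [hpre])]
        have hlen : rest.length ≤ n := by simpa using h
        rw [ih rest (c :: cur) acc hlen]
        simp only [mySplit, if_neg hc]
        cases hm : mySplit rest with
        | nil => exact absurd hm (mySplit_ne_nil rest)
        | cons s ss => simp [consHead]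

lemma splitOn_quote (cs : List Char) :
    PySem.Chars.splitOn cs ['"'] = mySplit cs := by
  unfold PySem.Chars.splitOn
  rw [go_spec cs.length.succ cs [] [] (Nat.le_succ _)]
  cases hm : mySplit cs with
  | nil => exact absurd hm (mySplit_ne_nil cs)
  | cons s ss => simp [consHead]

-- A's loop returns some "Yes" iff some scanned segment contains a newline
lemma loop_any (wl : List (List Char)) (idxs : List Int) :
    stringBugLoop wl idxs
      = if idxs.any (fun i => PySem.Chars.isIn ['\n'] (PySem.List.pyGetD wl i [])) then some "Yes"
        else none := by
  induction idxs with
  | nil => simp [stringBugLoop]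
  | cons i rest ih =>
    simp only [stringBugLoop, List.any_cons]
    split_ifs with h1 h2 <;> simp_all

-- searching for a single character is membership
lemma isIn_singleton (x : Char) (l : List Char) :
    PySem.Chars.isIn [x] l = l.contains x := by
  rcases h : l.contains x with hf | ht
  · rw [PySem.Chars.isIn_eq_false_iff]
    intro hinf
    have : x ∈ l := hinf.mem (by simp)
    simp_all
  · have hx : x ∈ l := by simpa using h
    obtain ⟨t1, t2, rfl⟩ := List.append_of_mem hx
    rw [show t1 ++ x :: t2 = t1 ++ [x] ++ t2 by simp]
    rw [(PySem.Chars.isIn_iff_infix _ _).2 ⟨t1, t2, rfl⟩]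

-- newline presence at the odd positions, structurally
def oddNl : List (List Char) → Bool
  | [] => false
  | [_] => false
  | _ :: s :: rest => PySem.Chars.isIn ['\n'] s || oddNl rest

lemma range_shift (n : Nat) :
    PySem.List.pyRange 1 ((n : Int) + 2) 2
      = 1 :: (PySem.List.pyRange 1 (n : Int) 2).map (· + 2) := by
  rw [PySem.List.pyRange_of_pos 1 ((n : Int) + 2) (by norm_num),
      PySem.List.pyRange_of_pos 1 (n : Int) (by norm_num)]
  rw [if_pos (by omega : (1 : Int) < (n : Int) + 2)]
  by_cases h2 : (1 : Int) < (n : Int)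
  · rw [if_pos h2]
    have e1 : (((n : Int) + 2 - 1 + 2 - 1) / 2).toNat = n / 2 + 1 := by omega
    have e2 : (((n : Int) - 1 + 2 - 1) / 2).toNat = n / 2 := by omega
    rw [e1, e2, List.range_succ_eq_map, List.map_cons, List.map_map, List.map_map,
      List.cons.injEq]
    refine ⟨by norm_num, ?_⟩
    apply List.map_congr_left
    intro k _
    simp only [Function.comp_apply]
    push_cast
    ring
  · rw [if_neg h2]
    have : n = 0 ∨ n = 1 := by omega
    rcases this with rfl | rfl <;> decide

lemma pyGetD_cons2 (a b : List Char) (rest : List (List Char)) (i : Int) (hi : 0 ≤ i) :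
    PySem.List.pyGetD (a :: b :: rest) (i + 2) [] = PySem.List.pyGetD rest i [] := by
  rw [PySem.List.pyGetD_of_nonneg _ _ (by omega), PySem.List.pyGetD_of_nonneg _ _ hi]
  have : (i + 2).toNat = i.toNat + 2 := by omega
  rw [this]
  rfl

theorem anyOdd_eq : ∀ (wl : List (List Char)),
    (PySem.List.pyRange 1 (wl.length : Int) 2).any
      (fun i => PySem.Chars.isIn ['\n'] (PySem.List.pyGetD wl i [])) = oddNl wl
  | [] => by decide
  | [a] => by
    simp only [List.length_singleton, Nat.cast_one]
    rw [PySem.List.pyRange_of_pos 1 1 (by norm_num), if_neg (by omega)]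
    rfl
  | a :: b :: rest => by
    have ih := anyOdd_eq rest
    have hl : ((a :: b :: rest).length : Int) = (rest.length : Int) + 2 := by
      simp only [List.length_cons]
      push_cast
      ring
    rw [hl, range_shift, List.any_cons, List.any_map]
    have h1 : PySem.List.pyGetD (a :: b :: rest) 1 [] = b := by
      rw [PySem.List.pyGetD_of_nonneg _ _ (by norm_num)]
      rfl
    rw [h1]
    have hcong : (PySem.List.pyRange 1 (rest.length : Int) 2).any
        ((fun i => PySem.Chars.isIn ['\n'] (PySem.List.pyGetD (a :: b :: rest) i [])) ∘ (· + 2))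
        = (PySem.List.pyRange 1 (rest.length : Int) 2).any
        (fun i => PySem.Chars.isIn ['\n'] (PySem.List.pyGetD rest i [])) := by
      rw [Bool.eq_iff_iff]
      simp only [List.any_eq_true, Function.comp_apply]
      constructor
      · rintro ⟨i, hi, hp⟩
        have hb := (PySem.List.mem_pyRange_iff_of_pos (by norm_num : (0:Int) < 2) i).1 hi
        exact ⟨i, hi, by rwa [pyGetD_cons2 a b rest i (by omega)] at hp⟩
      · rintro ⟨i, hi, hp⟩
        have hb := (PySem.List.mem_pyRange_iff_of_pos (by norm_num : (0:Int) < 2) i).1 hi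
        exact ⟨i, hi, by rwa [pyGetD_cons2 a b rest i (by omega)]⟩
    rw [hcong, ih]
    rfl
termination_by wl => wl.length

lemma isIn_nl_nil : PySem.Chars.isIn ['\n'] ([] : List Char) = false := by decide

lemma isIn_nl_cons (c : Char) (s : List Char) :
    PySem.Chars.isIn ['\n'] (c :: s) = (decide (c = '\n') || PySem.Chars.isIn ['\n'] s) := by
  rw [isIn_singleton, isIn_singleton, List.contains_cons]
  rcases eq_or_ne c '\n' with rfl | h
  · simp
  · simp [h, Ne.symm h]

-- B's scan, expressed per split-segment
def ansSeg : Bool → List (List Char) → String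
  | inside, [] => if inside then "Yes" else "No"
  | inside, [_] => if inside then "Yes" else "No"
  | inside, seg :: rest => if inside && PySem.Chars.isIn ['\n'] seg then "Yes" else ansSeg (!inside) rest

lemma scan_ans (cs : List Char) : ∀ inside, scanAlt cs inside = ansSeg inside (mySplit cs) := by
  induction cs with
  | nil => intro inside; simp [scanAlt, mySplit, ansSeg]
  | cons c rest ih =>
    intro inside
    by_cases hc : c = '"'
    · subst hc
      simp only [scanAlt, mySplit, reduceIte]
      rw [ih]
      cases hm : mySplit rest with
      | nil => exact absurd hm (mySplit_ne_nil rest)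
      | cons s ss => simp [ansSeg, isIn_nl_nil]
    · simp only [scanAlt, mySplit, if_neg hc]
      rw [ih]
      cases hm : mySplit rest with
      | nil => exact absurd hm (mySplit_ne_nil rest)
      | cons s ss =>
        cases ss with
        | nil =>
          cases inside
          · simp [ansSeg]
          · by_cases hnl : c = '\n' <;> simp [ansSeg, hnl]
        | cons t ts =>
          cases inside
          · simp [ansSeg]
          · by_cases hnl : c = '\n' <;>
              by_cases hs : PySem.Chars.isIn ['\n'] s = true <;>
              simp [ansSeg, isIn_nl_cons, hnl, hs]

theorem ans_closed : ∀ (wl : List (List Char)), wl ≠ [] →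
    ansSeg false wl
      = (if wl.length = 1 then "No"
         else if oddNl wl then "Yes"
         else if wl.length % 2 = 0 then "Yes" else "No")
  | [], h => absurd rfl h
  | [a], _ => by simp [ansSeg]
  | [a, b], _ => by simp [ansSeg]
  | a :: b :: r :: rs, _ => by
    have ih := ans_closed (r :: rs) (by simp)
    simp only [ansSeg, Bool.false_and, Bool.false_eq_true, if_false, Bool.not_false,
      Bool.true_and, oddNl]
    by_cases hnl : PySem.Chars.isIn ['\n'] b = true
    · simp [hnl]
    · simp only [Bool.not_eq_true] at hnl
      simp only [hnl, Bool.false_or, Bool.false_eq_true, if_false, Bool.not_true]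
      rw [ih]
      have hlen : (a :: b :: r :: rs).length = (r :: rs).length + 2 := by simp
      have hne1 : (a :: b :: r :: rs).length ≠ 1 := by simp
      rw [if_neg hne1]
      by_cases h1 : (r :: rs).length = 1
      · -- rs = [], lengths 1 and 3, both odd; oddNl [r] = false
        have : rs = [] := by cases rs <;> simp_all
        subst this
        simp [oddNl]
      · rw [if_neg h1]
        by_cases hodd : oddNl (r :: rs) = true
        · simp [hodd]
        · simp only [Bool.not_eq_true] at hodd
          simp only [hodd, Bool.false_eq_true, if_false, hlen]
          have : ((r :: rs).length + 2) % 2 = (r :: rs).length % 2 := by omega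
          rw [this]
termination_by wl => wl.length

-- ===== VERDICT (by name: the statement is the Claim_ definition above) =====
theorem string_bug_spec : Claim_equal_string_bug := by
  intro f _
  unfold Spec_string_bug string_bug string_bug_alt
  rw [splitOn_quote, scan_ans, ans_closed _ (mySplit_ne_nil f.toList)]
  simp only []
  rw [loop_any, anyOdd_eq]
  set wl := mySplit f.toList with hwl
  by_cases h1 : wl.length = 1
  · rw [if_pos (by exact_mod_cast h1), if_pos h1]
  · rw [if_neg (by exact_mod_cast h1), if_neg h1]
    by_cases h2 : oddNl wl = true
    · rw [h2]; rfl
    · simp only [Bool.not_eq_true] at h2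
      rw [h2]
      simp only [Bool.false_eq_true, if_false]
      have hband : PySem.Int.band (wl.length : Int) 1 = ((wl.length % 2 : Nat) : Int) := by
        rw [show (1 : Int) = ((1 : Nat) : Int) from rfl, PySem.Int.band_natCast,
          Nat.and_one_is_mod]
      rw [hband]
      by_cases hpar : wl.length % 2 = 0
      · rw [if_pos (by rw [hpar]; decide), if_pos hpar]
      · have : wl.length % 2 = 1 := by omega
        rw [if_neg (by rw [this]; simp), if_neg hpar]
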